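-- pv_equiv track=rewrite | github.com/kubasulek2/algorithms | DataStructures/src/test.py | largestSub
-- ===== SOURCE A (Python) =====
-- def findInd(preSum, n, val):
--
--     # Starting and ending index of
--     # search space.
--     l, h = 0, n - 1
--
--     # To store required index value.
--     ans = -1
--
--     # If middle value is less than or equal
--     # to val then index can lie in mid+1..n
--     # else it lies in 0..mid-1.
--     while l <= h:
--         mid = (l + h) // 2
--         if preSum[mid][0] <= val:
--             ans = mid
--             l = mid + 1
--
--         else:
--             h = mid - 1
--
--     return ans
--
-- def largestSub(arr, n, k):
--
--     # Length of largest subarray.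
--     maxlen = 0
--
--     # Vector to store pair of prefix sum
--     # and corresponding ending index value.
--     preSum = []
--
--     # To store the current value of prefix sum.
--     Sum = 0
--
--     # To store minimum index value in range
--     # 0..i of preSum vector.
--     minInd = [None] * (n)
--
--     # Insert values in preSum vector.
--     for i in range(0, n):
--         Sum = Sum + arr[i]
--         preSum.append([Sum, i])
--
--     preSum.sort()
--
--     # Update minInd array.
--     minInd[0] = preSum[0][1]
--
--     for i in range(1, n):
--         minInd[i] = min(minInd[i - 1],
--                         preSum[i][1])
--
--     Sum = 0
--     for i in range(0, n):
--         Sum = Sum + arr[i]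
--
--         # If sum is greater than k, then
--         # answer is i+1.
--         if Sum > k:
--             maxlen = i + 1
--
--         # If sum is less than or equal to k,
--         # then find if there is a prefix array
--         # having sum that needs to be added to
--         # current sum to make its value greater
--         # than k. If yes, then compare length
--         # of updated subarray with maximum
--         # length found so far.
--         else:
--             ind = findInd(preSum, n, Sum - k - 1)
--             if ind != -1 and minInd[ind] < i:
--                 maxlen = max(maxlen, i - minInd[ind])
--
--     return maxlen
-- ===== SOURCE B (Python) =====
-- def largestSub(arr, n, k):
--     # Longest subarray with sum > k, by direct window enumeration:
--     # for every start, extend the window rightwards keeping a running sum.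
--     best = 0
--     for start in range(n):
--         total = 0
--         for end in range(start, n):
--             total = total + arr[end]
--             if total > k:
--                 best = max(best, end - start + 1)
--     return best
-- ===== Notes on version B (the rewrite author's own statement) =====
-- stated objective: simpler
-- what changed: Replaced the prefix-sum vector + lexicographic sort + binary search + min-index table with a plain two-loop window enumeration keeping a running sum; B is a quarter of the size with no auxiliary arrays.
import Mathlib
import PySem

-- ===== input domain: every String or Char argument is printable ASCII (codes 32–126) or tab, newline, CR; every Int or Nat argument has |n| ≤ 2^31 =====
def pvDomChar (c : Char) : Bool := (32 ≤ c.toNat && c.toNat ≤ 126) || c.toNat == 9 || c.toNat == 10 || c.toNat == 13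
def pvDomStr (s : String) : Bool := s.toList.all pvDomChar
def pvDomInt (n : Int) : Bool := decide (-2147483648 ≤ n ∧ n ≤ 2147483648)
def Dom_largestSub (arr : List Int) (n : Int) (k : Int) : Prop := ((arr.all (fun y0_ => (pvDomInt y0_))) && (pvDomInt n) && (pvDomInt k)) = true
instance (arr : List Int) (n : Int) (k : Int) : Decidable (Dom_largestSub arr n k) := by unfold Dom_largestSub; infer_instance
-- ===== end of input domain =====

-- B replaces A's prefix-sum vector + sort + binary search + min-index table by a plain
-- two-loop window enumeration with a running sum: simpler (no auxiliary arrays), not faster.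

-- ===== PORT A =====
-- the while-loop of findInd; state (l, h, ans), terminates since h - l shrinks
def findIndLoop (preSum : List (Int × Int)) (val l h ans : Int) : Int :=
  if hlh : l ≤ h then
    let mid := PySem.Int.floordiv (l + h) 2
    if (PySem.List.pyGetD preSum mid (0, 0)).1 ≤ val then
      findIndLoop preSum val (mid + 1) h mid
    else
      findIndLoop preSum val l (mid - 1) ans
  else ans
termination_by (h + 1 - l).toNat
decreasing_by
  · have := PySem.Int.floordiv_two_mid_bounds hlh; omega
  · have := PySem.Int.floordiv_two_mid_bounds hlh; omega

def findInd (preSum : List (Int × Int)) (n val : Int) : Int :=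
  findIndLoop preSum val 0 (n - 1) (-1)

-- preSum.sort(): Python sorts the two-element lists [Sum, i] lexicographically; since the
-- second components are strictly increasing in build order, the stable sort keyed on the
-- first component (PySem.List.sorted, Python's stable sort) yields exactly the same list.
def largestSub (arr : List Int) (n : Int) (k : Int) : Int :=
  let ps := (PySem.List.pyRange 0 n 1).foldl
      (fun (st : Int × List (Int × Int)) i =>
        (st.1 + PySem.List.pyGetD arr i 0,
         st.2 ++ [(st.1 + PySem.List.pyGetD arr i 0, i)])) (0, [])
  let preSum := PySem.List.sorted ps.2 (fun p => p.1) false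
  let minInd := (PySem.List.pyRange 1 n 1).foldl
      (fun (m : List Int) i =>
        m ++ [min (PySem.List.pyGetD m (i - 1) 0)
                  (PySem.List.pyGetD preSum i ((0 : Int), (0 : Int))).2])
      [(PySem.List.pyGetD preSum 0 ((0 : Int), (0 : Int))).2]
  let res := (PySem.List.pyRange 0 n 1).foldl
      (fun (st : Int × Int) i =>
        let S := st.2 + PySem.List.pyGetD arr i 0
        if S > k then ((i : Int) + 1, S)
        else
          let ind := findInd preSum n (S - k - 1)
          if ind ≠ -1 ∧ PySem.List.pyGetD minInd ind 0 < i then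
            (max st.1 (i - PySem.List.pyGetD minInd ind 0), S)
          else (st.1, S)) (0, 0)
  res.1

-- ===== PORT B =====
def largestSub_alt (arr : List Int) (n : Int) (k : Int) : Int :=
  (PySem.List.pyRange 0 n 1).foldl
    (fun best s =>
      ((PySem.List.pyRange s n 1).foldl
        (fun (st : Int × Int) e =>
          let t := st.2 + PySem.List.pyGetD arr e 0
          (if t > k then max st.1 (e - s + 1) else st.1, t)) (best, 0)).1) 0

-- ===== PRECONDITION & SPEC =====
-- A raises IndexError when n ≤ 0 (preSum[0] on an empty list) or n > len(arr) (arr[i]);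
-- Pre_ is exactly the set of inputs on which A returns.
def Pre_largestSub (arr : List Int) (n : Int) (k : Int) : Prop :=
  1 ≤ n ∧ n ≤ (arr.length : Int)
instance (arr : List Int) (n : Int) (k : Int) : Decidable (Pre_largestSub arr n k) := by
  unfold Pre_largestSub; infer_instance
def pvWitness_largestSub : List Int × Int × Int := ([1, -2, 3], 3, 1)

def Spec_largestSub (arr : List Int) (n : Int) (k : Int) (out : Int) : Prop := out = largestSub_alt arr n k
instance (arr : List Int) (n : Int) (k : Int) (out : Int) : Decidable (Spec_largestSub arr n k out) := by unfold Spec_largestSub; infer_instance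

-- ===== CLAIM (what is proved, stated in full; the proofs are below) =====
def Claim_equal_largestSub : Prop := ∀ (arr : List Int) (n : Int) (k : Int), Dom_largestSub arr n k → Pre_largestSub arr n k → Spec_largestSub arr n k (largestSub arr n k)

-- ===== LEMMAS AND PROOFS =====

/-- prefix sum: sum of the first `j` elements. -/
def pfx (arr : List Int) (j : ℕ) : Int := (arr.take j).sum

/-- `goodUpto arr k m L`: some window `s..e` with `e < m` has sum `> k` and length `L`. -/
def goodUpto (arr : List Int) (k : Int) (m L : ℕ) : Prop :=
  ∃ s e : ℕ, e < m ∧ s ≤ e ∧ L = e - s + 1 ∧ pfx arr (e + 1) - pfx arr s > k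

theorem pfx_succ (arr : List Int) (j : ℕ) (h : j < arr.length) :
    pfx arr (j + 1) = pfx arr j + arr[j] := by
  unfold pfx
  exact List.sum_take_succ arr j h


/-- `arr[i]` for an in-range natural index. -/
theorem pyGetD_nat (arr : List Int) (m : ℕ) (h : m < arr.length) :
    PySem.List.pyGetD arr (m : Int) 0 = arr[m] := by
  rw [PySem.List.pyGetD_natCast]
  simp [List.getD_eq_getElem?_getD, List.getElem?_eq_getElem h]

/-- the (prefix-sum, index) list A builds, in construction order. -/
def psList (arr : List Int) (nn : ℕ) : List (Int × Int) :=
  (List.range nn).map (fun j => (pfx arr (j + 1), (j : Int)))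

/-- the sorted prefix-sum list of A. -/
def sortedPS (arr : List Int) (nn : ℕ) : List (Int × Int) :=
  PySem.List.sorted (psList arr nn) (fun p => p.1) false

theorem length_psList (arr : List Int) (nn : ℕ) : (psList arr nn).length = nn := by
  simp [psList]

theorem length_sortedPS (arr : List Int) (nn : ℕ) : (sortedPS arr nn).length = nn := by
  rw [sortedPS, PySem.List.length_sorted, length_psList]

theorem ps_build (arr : List Int) (nn : ℕ) (h : nn ≤ arr.length) :
    (PySem.List.pyRange 0 (nn : Int) 1).foldl
      (fun (st : Int × List (Int × Int)) i =>
        (st.1 + PySem.List.pyGetD arr i 0,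
         st.2 ++ [(st.1 + PySem.List.pyGetD arr i 0, i)])) (0, [])
      = (pfx arr nn, psList arr nn) := by
  induction nn with
  | zero => simp [PySem.List.pyRange_one_eq_nil, pfx, psList]
  | succ m ih =>
      have hrange : PySem.List.pyRange 0 ((m : ℕ) + 1 : ℕ) 1
          = PySem.List.pyRange 0 (m : Int) 1 ++ [(m : Int)] := by
        push_cast
        exact PySem.List.pyRange_one_succ_right (by exact_mod_cast Nat.zero_le m)
      rw [hrange, List.foldl_append, ih (by omega)]
      simp only [List.foldl_cons, List.foldl_nil]
      rw [pyGetD_nat arr m (by omega), ← pfx_succ arr m (by omega)]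
      simp [psList, List.range_succ]

/-- a predicate true exactly below a boundary has `countP` equal to the boundary. -/
theorem countP_boundary {α : Type} (L : List α) (p : α → Bool) (c : ℕ) (hc : c ≤ L.length)
    (h1 : ∀ j, (hj : j < L.length) → j < c → p L[j])
    (h2 : ∀ j, (hj : j < L.length) → c ≤ j → ¬ p L[j] = true) : L.countP p = c := by
  induction L generalizing c with
  | nil => simp at hc ⊢; omega
  | cons x t ih =>
      cases c with
      | zero =>
          rw [List.countP_eq_zero]
          intro a ha
          obtain ⟨j, hj, rfl⟩ := List.mem_iff_getElem.mp ha
          exact h2 j hj (Nat.zero_le j)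
      | succ c =>
          have hpx : p x = true := by simpa using h1 0 (by simp) (by omega)
          rw [List.countP_cons_of_pos hpx]
          have := ih c (by simpa using hc)
            (fun j hj hjc => h1 (j + 1) (by simpa using hj) (by omega))
            (fun j hj hjc => h2 (j + 1) (by simpa using hj) (by omega))
          omega

/-- binary-search loop: with a sorted list and a boundary invariant, the loop returns
    (number of entries ≤ val) - 1. -/
theorem findLoop_eq (L : List (Int × Int)) (val : Int)
    (hmono : L.Pairwise (fun a b => a.1 ≤ b.1)) :
    ∀ (N : ℕ) (l h ans : Int), (h + 1 - l).toNat ≤ N → 0 ≤ l → l ≤ h + 1 → ans = l - 1 →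
      h ≤ (L.length : Int) - 1 →
      (∀ j : ℕ, (hj : j < L.length) → (j : Int) < l → (L[j]).1 ≤ val) →
      (∀ j : ℕ, (hj : j < L.length) → h < (j : Int) → ¬ (L[j]).1 ≤ val) →
      findIndLoop L val l h ans = (L.countP (fun p => decide (p.1 ≤ val)) : Int) - 1 := by
  have hpair := List.pairwise_iff_getElem.mp hmono
  intro N
  induction N with
  | zero =>
      intro l h ans hN h0 hlh1 hans hhlen h4 h5
      have hexit : ¬ l ≤ h := by omega
      rw [findIndLoop, dif_neg hexit]
      have hcount : L.countP (fun p => decide (p.1 ≤ val)) = l.toNat := by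
        refine countP_boundary L _ l.toNat (by omega) ?_ ?_
        · intro j hj hjc
          simpa using h4 j hj (by omega)
        · intro j hj hjc
          simpa using h5 j hj (by omega)
      rw [hcount]; omega
  | succ N ih =>
      intro l h ans hN h0 hlh1 hans hhlen h4 h5
      by_cases hlh : l ≤ h
      · rw [findIndLoop, dif_pos hlh]
        obtain ⟨hm1, hm2⟩ := PySem.Int.floordiv_two_mid_bounds hlh
        set mid := PySem.Int.floordiv (l + h) 2 with hmid
        have hmidlen : mid < (L.length : Int) := by omega
        have hmid0 : 0 ≤ mid := by omega
        have hget : PySem.List.pyGetD L mid (0, 0) = L[mid.toNat]'(by omega) :=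
          PySem.List.pyGetD_eq_getElem L (0, 0) hmid0 hmidlen
        by_cases hp : (PySem.List.pyGetD L mid (0, 0)).1 ≤ val
        · rw [if_pos hp]
          refine ih (mid + 1) h mid (by omega) (by omega) (by omega) (by omega) hhlen ?_ h5
          intro j hj hjl
          rcases Nat.lt_or_ge j mid.toNat with hc | hc
          · have := hpair j mid.toNat (by omega) (by omega) (by omega)
            rw [hget] at hp
            exact le_trans this hp
          · have : j = mid.toNat := by omega
            subst this
            rw [hget] at hp
            exact hp
        · rw [if_neg hp]
          refine ih l (mid - 1) ans (by omega) h0 (by omega) hans (by omega) h4 ?_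
          intro j hj hjh
          rcases Nat.lt_or_ge mid.toNat j with hc | hc
          · intro hcontra
            have := hpair mid.toNat j (by omega) (by omega) (by omega)
            rw [hget] at hp
            exact hp (le_trans this hcontra)
          · have : j = mid.toNat := by omega
            subst this
            rw [hget] at hp
            exact hp
      · rw [findIndLoop, dif_neg hlh]
        have hcount : L.countP (fun p => decide (p.1 ≤ val)) = l.toNat := by
          refine countP_boundary L _ l.toNat (by omega) ?_ ?_
          · intro j hj hjc
            simpa using h4 j hj (by omega)
          · intro j hj hjc
            simpa using h5 j hj (by omega)
        rw [hcount]; omega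

theorem findInd_eq (arr : List Int) (nn : ℕ) (val : Int) (h1 : 1 ≤ nn) :
    findInd (sortedPS arr nn) (nn : Int) val
      = ((sortedPS arr nn).countP (fun p => decide (p.1 ≤ val)) : Int) - 1 := by
  refine findLoop_eq (sortedPS arr nn) val ?_ nn 0 ((nn : Int) - 1) (-1)
    (by omega) (by omega) (by omega) (by omega) (by rw [length_sortedPS]) ?_ ?_
  · exact PySem.List.sorted_pairwise (psList arr nn) (fun p => p.1)
  · intro j hj hjl
    omega
  · intro j hj hjh
    rw [length_sortedPS] at hj
    omega

theorem sorted_filter_take (L : List (Int × Int)) (val : Int)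
    (h : L.Pairwise (fun a b => a.1 ≤ b.1)) :
    L.filter (fun p => decide (p.1 ≤ val)) = L.take (L.countP (fun p => decide (p.1 ≤ val))) := by
  induction L with
  | nil => simp
  | cons x t ih =>
      rw [List.pairwise_cons] at h
      by_cases hx : x.1 ≤ val
      · rw [List.filter_cons_of_pos (by simpa using hx),
          List.countP_cons_of_pos (by simpa using hx)]
        rw [ih h.2]
        rfl
      · have hall : ∀ y ∈ t, ¬ y.1 ≤ val := fun y hy hc => hx (le_trans (h.1 y hy) hc)
        rw [List.filter_cons_of_neg (by simpa using hx),
          List.countP_cons_of_neg (by simpa using hx)]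
        have ht0 : t.countP (fun p => decide (p.1 ≤ val)) = 0 :=
          List.countP_eq_zero.mpr (fun y hy => by simpa using hall y hy)
        have htf : t.filter (fun p => decide (p.1 ≤ val)) = [] :=
          List.filter_eq_nil_iff.mpr (fun y hy => by simpa using hall y hy)
        rw [htf, ht0]
        simp

theorem foldl_min_le_init (l : List Int) (a : Int) : l.foldl min a ≤ a := by
  induction l generalizing a with
  | nil => simp
  | cons x t ih => exact le_trans (ih (min a x)) (min_le_left a x)

theorem foldl_min_le_mem (l : List Int) (a x : Int) (hx : x ∈ l) : l.foldl min a ≤ x := by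
  induction l generalizing a with
  | nil => simp at hx
  | cons y t ih =>
      rcases List.mem_cons.mp hx with rfl | hx'
      · exact le_trans (foldl_min_le_init t (min a x)) (min_le_right a x)
      · exact ih (min a y) hx'

theorem foldl_min_mem (l : List Int) (a : Int) : l.foldl min a = a ∨ l.foldl min a ∈ l := by
  induction l generalizing a with
  | nil => exact Or.inl rfl
  | cons x t ih =>
      rcases ih (min a x) with h | h
      · rcases min_cases a x with ⟨he, _⟩ | ⟨he, _⟩
        · exact Or.inl (by rw [List.foldl_cons, h, he])
        · exact Or.inr (by rw [List.foldl_cons, h, he]; exact List.mem_cons_self ..)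
      · exact Or.inr (List.mem_cons_of_mem x h)

/-- minimum of the second components (0 for the empty list, never used there). -/
def sndMin : List (Int × Int) → Int
  | [] => 0
  | q :: t => t.foldl (fun a p => min a p.2) q.2

theorem foldl_min_snd (t : List (Int × Int)) (a : Int) :
    t.foldl (fun b p => min b p.2) a = (t.map (fun p => p.2)).foldl min a := by
  rw [List.foldl_map]

theorem sndMin_mem (l : List (Int × Int)) (hl : l ≠ []) : ∃ p ∈ l, sndMin l = p.2 := by
  obtain ⟨q, t, rfl⟩ := List.exists_cons_of_ne_nil hl
  rw [sndMin, foldl_min_snd]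
  rcases foldl_min_mem (t.map (fun p => p.2)) q.2 with h | h
  · exact ⟨q, List.mem_cons_self .., h⟩
  · obtain ⟨p, hp, hpe⟩ := List.mem_map.mp h
    exact ⟨p, List.mem_cons_of_mem q hp, by omega⟩

theorem sndMin_le (l : List (Int × Int)) (p : Int × Int) (hp : p ∈ l) : sndMin l ≤ p.2 := by
  rcases l with _ | ⟨q, t⟩
  · simp at hp
  · rw [sndMin, foldl_min_snd]
    rcases List.mem_cons.mp hp with rfl | hp'
    · exact foldl_min_le_init _ _
    · exact foldl_min_le_mem _ _ _ (List.mem_map.mpr ⟨p, hp', rfl⟩)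

theorem sndMin_append (l : List (Int × Int)) (x : Int × Int) (hl : l ≠ []) :
    sndMin (l ++ [x]) = min (sndMin l) x.2 := by
  obtain ⟨q, t, rfl⟩ := List.exists_cons_of_ne_nil hl
  rw [List.cons_append, sndMin, sndMin, List.foldl_append]
  simp

/-- the min-index table A builds. -/
def minIndL (arr : List Int) (nn : ℕ) : List Int :=
  (List.range nn).map (fun i => sndMin ((sortedPS arr nn).take (i + 1)))

theorem minInd_build (arr : List Int) (nn : ℕ) (h1 : 1 ≤ nn) :
    (PySem.List.pyRange 1 (nn : Int) 1).foldl
      (fun (m : List Int) i =>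
        m ++ [min (PySem.List.pyGetD m (i - 1) 0)
                  (PySem.List.pyGetD (sortedPS arr nn) i ((0 : Int), (0 : Int))).2])
      [(PySem.List.pyGetD (sortedPS arr nn) 0 ((0 : Int), (0 : Int))).2]
      = minIndL arr nn := by
  have hlen := length_sortedPS arr nn
  set sp := sortedPS arr nn with hsp
  have hget0 : PySem.List.pyGetD sp 0 ((0 : Int), (0 : Int)) = sp[0]'(by omega) :=
    PySem.List.pyGetD_eq_getElem sp _ (by omega) (by omega)
  have htake1 : sndMin (sp.take 1) = (sp[0]'(by omega)).2 := by
    have ht : sp.take 1 = [sp[0]'(by omega)] := by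
      rw [show (1 : ℕ) = 0 + 1 from rfl, List.take_add_one,
        List.getElem?_eq_getElem (by omega : 0 < sp.length)]
      simp
    rw [ht]
    simp [sndMin]
  have haux : ∀ m : ℕ, 1 ≤ m → m ≤ nn →
      (PySem.List.pyRange 1 (m : Int) 1).foldl
        (fun (mi : List Int) i =>
          mi ++ [min (PySem.List.pyGetD mi (i - 1) 0)
                    (PySem.List.pyGetD sp i ((0 : Int), (0 : Int))).2])
        [(PySem.List.pyGetD sp 0 ((0 : Int), (0 : Int))).2]
        = (List.range m).map (fun i => sndMin (sp.take (i + 1))) := by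
    intro m
    induction m with
    | zero => omega
    | succ m ih =>
        intro _ hmn
        rcases Nat.eq_or_lt_of_le (show 1 ≤ m + 1 by omega) with h1m | h1m
        · -- m + 1 = 1
          have hm0 : m = 0 := by omega
          subst hm0
          rw [show ((1 : ℕ) : Int) = 1 by norm_num, PySem.List.pyRange_one_eq_nil (by omega)]
          simp [hget0, htake1]
        · -- m ≥ 1
          have hm1 : 1 ≤ m := by omega
          have hrange : PySem.List.pyRange 1 ((m : ℕ) + 1 : ℕ) 1
              = PySem.List.pyRange 1 (m : Int) 1 ++ [(m : Int)] := by
            push_cast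
            exact PySem.List.pyRange_one_succ_right (by exact_mod_cast hm1)
          rw [hrange, List.foldl_append, ih hm1 (by omega)]
          simp only [List.foldl_cons, List.foldl_nil]
          have hprev : PySem.List.pyGetD
              ((List.range m).map (fun i => sndMin (sp.take (i + 1)))) ((m : Int) - 1) 0
              = sndMin (sp.take m) := by
            rw [show ((m : Int) - 1) = ((m - 1 : ℕ) : Int) by omega, PySem.List.pyGetD_natCast]
            rw [List.getD_eq_getElem?_getD, List.getElem?_map,
              List.getElem?_range (by omega : m - 1 < m)]
            simp only [Option.map_some, Option.getD_some]
            have hmm : m - 1 + 1 = m := by omega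
            rw [hmm]
          have hgetm : PySem.List.pyGetD sp (m : Int) ((0 : Int), (0 : Int)) = sp[m]'(by omega) := by
            have := PySem.List.pyGetD_eq_getElem sp ((0 : Int), (0 : Int))
              (show (0:Int) ≤ (m : Int) by omega) (show (m : Int) < sp.length by omega)
            simpa using this
          have htakes : sp.take (m + 1) = sp.take m ++ [sp[m]'(by omega)] := by
            rw [List.take_add_one, List.getElem?_eq_getElem (by omega : m < sp.length)]
            simp
          have hne : sp.take m ≠ [] := by
            have hl : (sp.take m).length = m := by
              rw [List.length_take]
              omega
            intro h
            rw [h] at hl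
            simp at hl
            omega
          rw [hprev, hgetm, List.range_succ, List.map_append]
          simp only [List.map_cons, List.map_nil]
          rw [htakes, sndMin_append _ _ hne]
  exact haux nn h1 (le_refl nn)

/-- A's main-loop step, abbreviated (body identical to the port's lambda). -/
def mainStep (arr : List Int) (k : Int) (sp : List (Int × Int)) (mi : List Int) (n : Int) :
    Int × Int → Int → Int × Int := fun st i =>
  let S := st.2 + PySem.List.pyGetD arr i 0
  if S > k then (i + 1, S)
  else
    let ind := findInd sp n (S - k - 1)
    if ind ≠ -1 ∧ PySem.List.pyGetD mi ind 0 < i then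
      (max st.1 (i - PySem.List.pyGetD mi ind 0), S)
    else (st.1, S)

theorem largestSub_eq (arr : List Int) (nn : ℕ) (k : Int) (h1 : 1 ≤ nn) (h2 : nn ≤ arr.length) :
    largestSub arr (nn : Int) k
      = ((PySem.List.pyRange 0 (nn : Int) 1).foldl
          (mainStep arr k (sortedPS arr nn) (minIndL arr nn) (nn : Int)) (0, 0)).1 := by
  simp only [largestSub]
  rw [ps_build arr nn h2]
  rw [show PySem.List.sorted (pfx arr nn, psList arr nn).2 (fun p => p.1) false
      = sortedPS arr nn from rfl]
  rw [minInd_build arr nn h1]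
  rfl

theorem countP_sortedPS (arr : List Int) (nn : ℕ) (val : Int) :
    (sortedPS arr nn).countP (fun p => decide (p.1 ≤ val))
      = (psList arr nn).countP (fun p => decide (p.1 ≤ val)) :=
  (PySem.List.sorted_perm (psList arr nn) (fun p => p.1) false).countP_eq _

theorem mem_psList (arr : List Int) (nn : ℕ) (p : Int × Int) :
    p ∈ psList arr nn ↔ ∃ j : ℕ, j < nn ∧ p = (pfx arr (j + 1), (j : Int)) := by
  simp only [psList, List.mem_map, List.mem_range]
  constructor
  · rintro ⟨j, hj, rfl⟩; exact ⟨j, hj, rfl⟩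
  · rintro ⟨j, hj, rfl⟩; exact ⟨j, hj, rfl⟩

theorem countP_zero_iff (arr : List Int) (nn : ℕ) (val : Int) :
    (sortedPS arr nn).countP (fun p => decide (p.1 ≤ val)) = 0
      ↔ ∀ j : ℕ, j < nn → ¬ pfx arr (j + 1) ≤ val := by
  rw [countP_sortedPS, List.countP_eq_zero]
  constructor
  · intro h j hj hc
    exact absurd (by simpa using h _ ((mem_psList arr nn _).mpr ⟨j, hj, rfl⟩)) (by simpa using hc)
  · intro h p hp
    obtain ⟨j, hj, rfl⟩ := (mem_psList arr nn p).mp hp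
    simpa using h j hj

theorem countP_le_nn (arr : List Int) (nn : ℕ) (val : Int) :
    (sortedPS arr nn).countP (fun p => decide (p.1 ≤ val)) ≤ nn := by
  have := List.countP_le_length (l := sortedPS arr nn) (p := fun p => decide (p.1 ≤ val))
  rwa [length_sortedPS] at this

theorem minIndL_get (arr : List Int) (nn t : ℕ) (h1t : 1 ≤ t) (ht : t ≤ nn) :
    PySem.List.pyGetD (minIndL arr nn) ((t : Int) - 1) 0
      = sndMin ((sortedPS arr nn).take t) := by
  rw [show ((t : Int) - 1) = ((t - 1 : ℕ) : Int) by omega, PySem.List.pyGetD_natCast]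
  rw [minIndL, List.getD_eq_getElem?_getD, List.getElem?_map,
    List.getElem?_range (by omega : t - 1 < nn)]
  simp only [Option.map_some, Option.getD_some]
  have hmm : t - 1 + 1 = t := by omega
  rw [hmm]

theorem t_pos_facts (arr : List Int) (nn : ℕ) (val : Int)
    (ht : 0 < (sortedPS arr nn).countP (fun p => decide (p.1 ≤ val))) :
    ∃ j0 : ℕ, j0 < nn ∧ pfx arr (j0 + 1) ≤ val ∧
      sndMin ((sortedPS arr nn).take
        ((sortedPS arr nn).countP (fun p => decide (p.1 ≤ val)))) = (j0 : Int) ∧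
      ∀ j : ℕ, j < nn → pfx arr (j + 1) ≤ val → j0 ≤ j := by
  set sp := sortedPS arr nn with hsp
  set t := sp.countP (fun p => decide (p.1 ≤ val)) with htdef
  have hpair : sp.Pairwise (fun a b => a.1 ≤ b.1) :=
    PySem.List.sorted_pairwise (psList arr nn) (fun p => p.1)
  have htake : sp.take t = sp.filter (fun p => decide (p.1 ≤ val)) :=
    (sorted_filter_take sp val hpair).symm
  have hperm := PySem.List.sorted_perm (psList arr nn) (fun p => p.1) false
  have hne : sp.take t ≠ [] := by
    rw [htake]
    intro h
    have := List.countP_eq_length_filter (l := sp) (p := fun p => decide (p.1 ≤ val))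
    rw [← htdef, h] at this
    simp at this
    omega
  obtain ⟨p, hpmem, hpe⟩ := sndMin_mem _ hne
  rw [htake, List.mem_filter] at hpmem
  obtain ⟨hpsp, hpred⟩ := hpmem
  obtain ⟨j0, hj0, rfl⟩ := (mem_psList arr nn p).mp (hperm.mem_iff.mp hpsp)
  refine ⟨j0, hj0, by simpa using hpred, hpe, ?_⟩
  intro j hj hjval
  have hqmem : (pfx arr (j + 1), (j : Int)) ∈ sp :=
    hperm.mem_iff.mpr ((mem_psList arr nn _).mpr ⟨j, hj, rfl⟩)
  have : (pfx arr (j + 1), (j : Int)) ∈ sp.take t := by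
    rw [htake, List.mem_filter]
    exact ⟨hqmem, by simpa using hjval⟩
  have hle := sndMin_le _ _ this
  rw [hpe] at hle
  simp only at hle
  exact_mod_cast hle

theorem pfx_zero (arr : List Int) : pfx arr 0 = 0 := rfl

theorem A_loop (arr : List Int) (nn : ℕ) (k : Int) (h1 : 1 ≤ nn) (h2 : nn ≤ arr.length)
    (m : ℕ) (hm : m ≤ nn) :
    let st := (PySem.List.pyRange 0 (m : Int) 1).foldl
      (mainStep arr k (sortedPS arr nn) (minIndL arr nn) (nn : Int)) (0, 0)
    st.2 = pfx arr m ∧ 0 ≤ st.1 ∧ st.1 ≤ (m : Int) ∧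
      (st.1 = 0 ∨ goodUpto arr k nn st.1.toNat) ∧
      ∀ s e : ℕ, e < m → s ≤ e → pfx arr (e + 1) - pfx arr s > k → (e : Int) - s + 1 ≤ st.1 := by
  induction m with
  | zero =>
      simp [PySem.List.pyRange_one_eq_nil (by omega : (0:Int) ≤ 0), pfx_zero]
  | succ m ih =>
      have hmn : m < nn := by omega
      have hrange : PySem.List.pyRange 0 ((m : ℕ) + 1 : ℕ) 1
          = PySem.List.pyRange 0 (m : Int) 1 ++ [(m : Int)] := by
        push_cast
        exact PySem.List.pyRange_one_succ_right (by exact_mod_cast Nat.zero_le m)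
      obtain ⟨ih1, ih2, ih3, ih4, ih5⟩ := ih (by omega)
      rw [hrange, List.foldl_append]
      simp only [List.foldl_cons, List.foldl_nil]
      set st := (PySem.List.pyRange 0 (m : Int) 1).foldl
        (mainStep arr k (sortedPS arr nn) (minIndL arr nn) (nn : Int)) (0, 0) with hst
      have hS : st.2 + PySem.List.pyGetD arr (m : Int) 0 = pfx arr (m + 1) := by
        rw [ih1, pyGetD_nat arr m (by omega), pfx_succ arr m (by omega)]
      simp only [mainStep, hS]
      by_cases hgt : pfx arr (m + 1) > k
      · rw [if_pos hgt]
        refine ⟨rfl, by omega, by push_cast; omega, ?_, ?_⟩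
        · right
          refine ⟨0, m, hmn, by omega, by omega, ?_⟩
          rw [pfx_zero]
          omega
        · intro s e he hse hsum
          rcases Nat.lt_or_ge e m with hc | hc
          · have := ih5 s e hc hse hsum
            omega
          · have : e = m := by omega
            omega
      · rw [if_neg hgt]
        rw [findInd_eq arr nn _ h1]
        set val := pfx arr (m + 1) - k - 1 with hval
        set t := (sortedPS arr nn).countP (fun p => decide (p.1 ≤ val)) with htdef
        by_cases ht : t = 0
        · rw [if_neg (by
            rintro ⟨hne, -⟩
            exact hne (by rw [ht]; simp))]
          refine ⟨rfl, ih2, by omega, ih4, ?_⟩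
          intro s e he hse hsum
          rcases Nat.lt_or_ge e m with hc | hc
          · exact ih5 s e hc hse hsum
          · have he' : e = m := by omega
            subst he'
            exfalso
            rcases Nat.eq_zero_or_pos s with rfl | hs
            · rw [pfx_zero] at hsum
              omega
            · have hjs : s - 1 < nn := by omega
              have : pfx arr ((s - 1) + 1) ≤ val := by
                have hss : s - 1 + 1 = s := by omega
                rw [hss, hval]
                omega
              exact (countP_zero_iff arr nn val).mp ht (s - 1) hjs this
        · obtain ⟨j0, hj0nn, hj0val, hj0min, hj0lb⟩ :=
            t_pos_facts arr nn val (by omega)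
          have hmi : PySem.List.pyGetD (minIndL arr nn) ((t : Int) - 1) 0 = (j0 : Int) := by
            rw [minIndL_get arr nn t (by omega) (by rw [htdef]; exact countP_le_nn arr nn val), htdef]
            exact hj0min
          rw [hmi]
          by_cases hj0m : j0 < m
          · rw [if_pos ⟨by omega, by exact_mod_cast hj0m⟩]
            refine ⟨rfl, by omega, ?_, ?_, ?_⟩
            · simp only [max_le_iff]
              omega
            · rcases max_cases st.1 ((m : Int) - (j0 : Int)) with ⟨hmx, _⟩ | ⟨hmx, _⟩
              · rw [hmx]; exact ih4
              · rw [hmx]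
                right
                refine ⟨j0 + 1, m, hmn, by omega, by omega, ?_⟩
                have : pfx arr (j0 + 1) ≤ val := hj0val
                omega
            · intro s e he hse hsum
              rcases Nat.lt_or_ge e m with hc | hc
              · exact le_trans (ih5 s e hc hse hsum) (le_max_left _ _)
              · have he' : e = m := by omega
                subst he'
                rcases Nat.eq_zero_or_pos s with rfl | hs
                · rw [pfx_zero] at hsum
                  omega
                · have hjs : s - 1 < nn := by omega
                  have hv : pfx arr ((s - 1) + 1) ≤ val := by
                    have hss : s - 1 + 1 = s := by omega
                    rw [hss, hval]
                    omega
                  have := hj0lb (s - 1) hjs hv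
                  have := le_max_right st.1 ((e : Int) - (j0 : Int))
                  omega
          · rw [if_neg (by
              rintro ⟨-, hlt⟩
              exact hj0m (by exact_mod_cast hlt))]
            refine ⟨rfl, ih2, by omega, ih4, ?_⟩
            intro s e he hse hsum
            rcases Nat.lt_or_ge e m with hc | hc
            · exact ih5 s e hc hse hsum
            · have he' : e = m := by omega
              subst he'
              exfalso
              rcases Nat.eq_zero_or_pos s with rfl | hs
              · rw [pfx_zero] at hsum
                omega
              · have hjs : s - 1 < nn := by omega
                have hv : pfx arr ((s - 1) + 1) ≤ val := by
                  have hss : s - 1 + 1 = s := by omega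
                  rw [hss, hval]
                  omega
                have := hj0lb (s - 1) hjs hv
                omega

theorem A_side (arr : List Int) (nn : ℕ) (k : Int) (h1 : 1 ≤ nn) (h2 : nn ≤ arr.length) :
    let r := largestSub arr (nn : Int) k
    (r = 0 ∨ goodUpto arr k nn r.toNat) ∧ 0 ≤ r ∧ ∀ L, goodUpto arr k nn L → (L : Int) ≤ r := by
  intro r
  obtain ⟨hl1, hl2, hl3, hl4, hl5⟩ := A_loop arr nn k h1 h2 nn (le_refl nn)
  have hr : r = ((PySem.List.pyRange 0 (nn : Int) 1).foldl
      (mainStep arr k (sortedPS arr nn) (minIndL arr nn) (nn : Int)) (0, 0)).1 :=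
    largestSub_eq arr nn k h1 h2
  rw [hr]
  refine ⟨hl4, hl2, ?_⟩
  intro L ⟨s, e, he1, he2, he3, he4⟩
  have := hl5 s e he1 he2 he4
  omega

theorem B_inner (arr : List Int) (k : Int) (s : ℕ) (best : Int) (m : ℕ)
    (hsm : s ≤ m) (hm : m ≤ arr.length) :
    let st := (PySem.List.pyRange (s : Int) (m : Int) 1).foldl
        (fun (st : Int × Int) e =>
          (if st.2 + PySem.List.pyGetD arr e 0 > k then max st.1 (e - (s : Int) + 1) else st.1,
           st.2 + PySem.List.pyGetD arr e 0)) (best, 0)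
    st.2 = pfx arr m - pfx arr s ∧ best ≤ st.1 ∧
      (st.1 = best ∨ ∃ e : ℕ, s ≤ e ∧ e < m ∧ st.1 = (e : Int) - s + 1 ∧
        pfx arr (e + 1) - pfx arr s > k) ∧
      (∀ e : ℕ, s ≤ e → e < m → pfx arr (e + 1) - pfx arr s > k → (e : Int) - s + 1 ≤ st.1) := by
  induction m with
  | zero =>
      have hs0 : s = 0 := by omega
      subst hs0
      simp [PySem.List.pyRange_one_eq_nil (by omega : (0:Int) ≤ 0)]
  | succ m ih =>
      rcases Nat.lt_or_ge s (m + 1) with hlt | hge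
      · -- s ≤ m : split the range at m
        have hsm' : s ≤ m := by omega
        have hm' : m ≤ arr.length := by omega
        have hrange : PySem.List.pyRange (s : Int) ((m : ℕ) + 1 : ℕ) 1
            = PySem.List.pyRange (s : Int) (m : Int) 1 ++ [(m : Int)] := by
          push_cast
          exact PySem.List.pyRange_one_succ_right (by exact_mod_cast hsm')
        obtain ⟨ih1, ih2, ih3, ih4⟩ := ih hsm' hm'
        rw [hrange, List.foldl_append]
        simp only [List.foldl_cons, List.foldl_nil]
        have hget : PySem.List.pyGetD arr (m : Int) 0 = arr[m]'(by omega) := by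
          rw [PySem.List.pyGetD_natCast]
          simp [List.getD_eq_getElem?_getD, List.getElem?_eq_getElem (by omega : m < arr.length)]
        set st := (PySem.List.pyRange (s : Int) (m : Int) 1).foldl
            (fun (st : Int × Int) e =>
              (if st.2 + PySem.List.pyGetD arr e 0 > k then max st.1 (e - (s : Int) + 1) else st.1,
               st.2 + PySem.List.pyGetD arr e 0)) (best, 0) with hst
        have hsum : st.2 + PySem.List.pyGetD arr (m : Int) 0 = pfx arr (m + 1) - pfx arr s := by
          rw [hget, ih1, pfx_succ arr m (by omega)]; ring
        by_cases hgt : st.2 + PySem.List.pyGetD arr (m : Int) 0 > k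
        · simp only [hgt, if_pos]
          refine ⟨by simpa using hsum, le_trans ih2 (le_max_left _ _), ?_, ?_⟩
          · rcases le_total ((m : Int) - s + 1) st.1 with hc | hc
            · rw [max_eq_left hc]
              exact ih3.imp id (fun ⟨e, he1, he2, he3, he4⟩ => ⟨e, he1, by omega, he3, he4⟩)
            · rw [max_eq_right hc]
              right
              exact ⟨m, hsm', by omega, rfl, by omega⟩
          · intro e he1 he2 he3
            rcases Nat.lt_or_ge e m with he | he
            · exact le_trans (ih4 e he1 he he3) (le_max_left _ _)
            · have : e = m := by omega
              subst this
              exact le_max_right _ _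
        · simp only [hgt, if_neg, not_false_iff]
          refine ⟨by simpa using hsum, ih2, ih3.imp id (fun ⟨e, he1, he2, he3, he4⟩ => ⟨e, he1, by omega, he3, he4⟩), ?_⟩
          intro e he1 he2 he3
          rcases Nat.lt_or_ge e m with he | he
          · exact ih4 e he1 he he3
          · have : e = m := by omega
            subst this
            omega
      · -- s = m + 1 : empty range
        have hs : s = m + 1 := by omega
        subst hs
        rw [PySem.List.pyRange_one_eq_nil (by push_cast; omega)]
        refine ⟨by simp, le_refl _, Or.inl rfl, ?_⟩
        intro e he1 he2
        omega

theorem B_outer (arr : List Int) (k : Int) (nn : ℕ) (hnn : nn ≤ arr.length) (m : ℕ) (hm : m ≤ nn) :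
    let b := (PySem.List.pyRange 0 (m : Int) 1).foldl
      (fun best s =>
        ((PySem.List.pyRange s (nn : Int) 1).foldl
          (fun (st : Int × Int) e =>
            (if st.2 + PySem.List.pyGetD arr e 0 > k then max st.1 (e - s + 1) else st.1,
             st.2 + PySem.List.pyGetD arr e 0)) (best, 0)).1) 0
    0 ≤ b ∧ (b = 0 ∨ goodUpto arr k nn b.toNat) ∧
      ∀ s e : ℕ, s < m → s ≤ e → e < nn → pfx arr (e + 1) - pfx arr s > k → (e : Int) - s + 1 ≤ b := by
  induction m with
  | zero =>
      simp [PySem.List.pyRange_one_eq_nil (by omega : (0:Int) ≤ 0)]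
  | succ m ih =>
      have hm' : m ≤ nn := by omega
      have hrange : PySem.List.pyRange 0 ((m : ℕ) + 1 : ℕ) 1
          = PySem.List.pyRange 0 (m : Int) 1 ++ [(m : Int)] := by
        push_cast
        exact PySem.List.pyRange_one_succ_right (by exact_mod_cast Nat.zero_le m)
      obtain ⟨ih1, ih2, ih3⟩ := ih hm'
      rw [hrange, List.foldl_append]
      simp only [List.foldl_cons, List.foldl_nil]
      set b := (PySem.List.pyRange 0 (m : Int) 1).foldl
        (fun best s =>
          ((PySem.List.pyRange s (nn : Int) 1).foldl
            (fun (st : Int × Int) e =>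
              (if st.2 + PySem.List.pyGetD arr e 0 > k then max st.1 (e - s + 1) else st.1,
               st.2 + PySem.List.pyGetD arr e 0)) (best, 0)).1) 0 with hb
      obtain ⟨in1, in2, in3, in4⟩ := B_inner arr k m b nn (by omega) hnn
      refine ⟨by omega, ?_, ?_⟩
      · rcases in3 with h | ⟨e, he1, he2, he3, he4⟩
        · rw [h]; exact ih2
        · rw [he3]
          right
          refine ⟨m, e, he2, he1, by omega, he4⟩
      · intro s e hs1 hs2 hs3 hs4
        rcases Nat.lt_or_ge s m with h | h
        · exact le_trans (ih3 s e h hs2 hs3 hs4) in2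
        · have : s = m := by omega
          subst this
          exact in4 e hs2 hs3 hs4

theorem B_side (arr : List Int) (nn : ℕ) (k : Int) (h2 : nn ≤ arr.length) :
    let r := largestSub_alt arr (nn : Int) k
    (r = 0 ∨ goodUpto arr k nn r.toNat) ∧ 0 ≤ r ∧ ∀ L, goodUpto arr k nn L → (L : Int) ≤ r := by
  intro r
  obtain ⟨h0, hg, hc⟩ := B_outer arr k nn h2 nn (le_refl _)
  have hr : r = (PySem.List.pyRange 0 (nn : Int) 1).foldl
      (fun best s =>
        ((PySem.List.pyRange s (nn : Int) 1).foldl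
          (fun (st : Int × Int) e =>
            (if st.2 + PySem.List.pyGetD arr e 0 > k then max st.1 (e - s + 1) else st.1,
             st.2 + PySem.List.pyGetD arr e 0)) (best, 0)).1) 0 := rfl
  rw [hr]
  refine ⟨hg, h0, ?_⟩
  intro L ⟨s, e, he1, he2, he3, he4⟩
  have := hc s e (by omega) he2 he1 he4
  omega

-- ===== VERDICT (by name: the statement is the Claim_ definition above) =====
theorem largestSub_spec : Claim_equal_largestSub := by
  intro arr n k _ hpre
  obtain ⟨hn1, hn2⟩ := hpre
  unfold Spec_largestSub
  have hnn : n = ((n.toNat : ℕ) : Int) := by omega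
  rw [hnn]
  obtain ⟨ha1, ha2, ha3⟩ := A_side arr n.toNat k (by omega) (by omega)
  obtain ⟨hb1, hb2, hb3⟩ := B_side arr n.toNat k (by omega)
  have le1 : largestSub arr (n.toNat : Int) k ≤ largestSub_alt arr (n.toNat : Int) k := by
    rcases ha1 with h | h
    · omega
    · have := hb3 _ h; omega
  have le2 : largestSub_alt arr (n.toNat : Int) k ≤ largestSub arr (n.toNat : Int) k := by
    rcases hb1 with h | h
    · omega
    · have := ha3 _ h; omega
  omega
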